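-- pv_equiv track=rewrite | github.com/sarwarbeing-ai/Scaler | Data Structure and Algorithms Python/Nintegerscontainingonly12and3.py | solve
-- ===== SOURCE A (Python) =====
-- def solve(A):
--     from collections import deque
--     qu=deque([1,2,3])
--     ans=-1
--     result=[]
--     for i in range(A):
--         ans=qu.popleft()
--         result.append(ans)
--         for d in [1,2,3]:
--             qu.append(ans*10+d)
--     return result
-- ===== SOURCE B (Python) =====
-- def solve(A):
--     # Each element computed independently by bijective base-3 digit extraction:
--     # the n-th number over digits {1,2,3} (in numeric order) is read off from n directly.
--     result = []
--     for n in range(1, A + 1):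
--         val = 0
--         mul = 1
--         while n > 0:
--             val += ((n - 1) % 3 + 1) * mul
--             mul *= 10
--             n = (n - 1) // 3
--         result.append(val)
--     return result
-- ===== Notes on version B (the rewrite author's own statement) =====
-- stated objective: alternative
-- what changed: Replaces the BFS queue (popping each value and appending its three children) by a direct per-index computation: the n-th value is obtained from n by bijective base-3 digit extraction, so no queue is maintained.
import Mathlib
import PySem

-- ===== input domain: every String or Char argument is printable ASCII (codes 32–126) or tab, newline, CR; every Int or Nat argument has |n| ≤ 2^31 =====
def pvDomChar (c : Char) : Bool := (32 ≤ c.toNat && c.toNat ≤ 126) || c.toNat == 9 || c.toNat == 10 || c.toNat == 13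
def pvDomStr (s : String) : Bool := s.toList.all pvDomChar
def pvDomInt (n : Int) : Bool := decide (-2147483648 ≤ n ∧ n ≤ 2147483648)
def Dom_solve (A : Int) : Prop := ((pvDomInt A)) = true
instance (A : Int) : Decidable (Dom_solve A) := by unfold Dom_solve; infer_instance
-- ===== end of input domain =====

-- B replaces A's BFS queue by an independent per-index bijective base-3 computation (alternative algorithm, same values).

-- ===== PORT A =====
-- the for-loop over range(A): A.toNat iterations, queue popped at the front, three children appended
def solveLoop : Nat → List Int → List Int → List Int
  | 0, _qu, res => res
  | Nat.succ k, qu, res =>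
    match qu with
    | [] => res   -- unreachable: the deque starts with 3 elements and grows by 2 each iteration
    | a :: rest => solveLoop k (rest ++ [a * 10 + 1, a * 10 + 2, a * 10 + 3]) (res ++ [a])

def solve (A : Int) : List Int := solveLoop A.toNat [1, 2, 3] []

-- ===== PORT B =====
-- the inner while-loop of Source B: while n > 0: val += ((n-1)%3+1)*mul; mul *= 10; n = (n-1)//3
def convAux (n val mul : Int) : Int :=
  if h : n > 0 then
    convAux (PySem.Int.floordiv (n - 1) 3) (val + (PySem.Int.mod (n - 1) 3 + 1) * mul) (mul * 10)
  else val
termination_by n.toNat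
decreasing_by
  have h3 : (0:Int) < 3 := by norm_num
  rw [PySem.Int.floordiv_eq_ediv_of_pos h3]
  omega

def solve_alt (A : Int) : List Int :=
  (PySem.List.pyRange 1 (A + 1) 1).map (fun n => convAux n 0 1)

-- ===== PRECONDITION & SPEC =====
def Spec_solve (A : Int) (out : List Int) : Prop := out = solve_alt A
instance (A : Int) (out : List Int) : Decidable (Spec_solve A out) := by unfold Spec_solve; infer_instance

-- ===== CLAIM (what is proved, stated in full; the proofs are below) =====
def Claim_equal_solve : Prop := ∀ (A : Int), Dom_solve A → Spec_solve A (solve A)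

-- ===== LEMMAS AND PROOFS =====

-- the value of the n-th number over digits {1,2,3}, defined by bijective base-3 recursion
def v : Nat → Nat
  | 0 => 0
  | m + 1 => 10 * v (m / 3) + (m % 3 + 1)
decreasing_by exact Nat.lt_succ_of_le (Nat.div_le_self m 3)

lemma v_child1 (n : Nat) : v (3 * n + 1) = 10 * v n + 1 := by
  show v (3 * n + 1) = _
  rw [v]
  congr 2
  · congr 1; omega
  · omega

lemma v_child2 (n : Nat) : v (3 * n + 2) = 10 * v n + 2 := by
  have : 3 * n + 2 = (3 * n + 1) + 1 := by ring
  rw [this, v]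
  congr 2
  · congr 1; omega
  · omega

lemma v_child3 (n : Nat) : v (3 * n + 3) = 10 * v n + 3 := by
  have : 3 * n + 3 = (3 * n + 2) + 1 := by ring
  rw [this, v]
  congr 2
  · congr 1; omega
  · omega

lemma convAux_eq (m : Nat) : ∀ (val mul : Int), convAux (m : Int) val mul = val + mul * (v m : Int) := by
  induction m using Nat.strong_induction_on with
  | _ m ih =>
    intro val mul
    match m with
    | 0 => rw [convAux]; simp [v]
    | Nat.succ p =>
      rw [convAux]
      have hpos : ((Nat.succ p : Nat) : Int) > 0 := by exact_mod_cast Nat.succ_pos p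
      rw [dif_pos hpos]
      have hsub : ((Nat.succ p : Nat) : Int) - 1 = (p : Int) := by push_cast; ring
      have hfd : PySem.Int.floordiv ((p : Nat) : Int) ((3:Nat):Int) = ((p / 3 : Nat) : Int) :=
        PySem.Int.floordiv_natCast p 3
      have hmd : PySem.Int.mod ((p : Nat) : Int) ((3:Nat):Int) = ((p % 3 : Nat) : Int) :=
        PySem.Int.mod_natCast p 3
      rw [hsub]
      rw [show ((3:Nat):Int) = (3:Int) from rfl] at hfd hmd
      rw [hfd, hmd]
      rw [ih (p / 3) (Nat.lt_succ_of_le (Nat.div_le_self p 3))]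
      have hv : v (Nat.succ p) = 10 * v (p / 3) + (p % 3 + 1) := by rw [v]
      rw [hv]
      push_cast
      ring

def vI (n : Nat) : Int := (v n : Int)

lemma solveLoop_eq (k : Nat) : ∀ (j : Nat) (res : List Int),
    solveLoop k ((List.range' (j + 1) (2 * j + 3)).map vI) res
      = res ++ (List.range' (j + 1) k).map vI := by
  induction k with
  | zero => intro j res; simp [solveLoop]
  | succ k ih =>
    intro j res
    have hq : List.range' (j + 1) (2 * j + 3)
        = (j + 1) :: List.range' (j + 2) (2 * j + 2) := by
      rw [show 2 * j + 3 = (2 * j + 2) + 1 from rfl, List.range'_succ]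
    rw [hq]
    simp only [List.map_cons, solveLoop]
    have hchildren : [vI (j+1) * 10 + 1, vI (j+1) * 10 + 2, vI (j+1) * 10 + 3]
        = (List.range' (3 * j + 4) 3).map vI := by
      have h1 : vI (3 * (j + 1) + 1) = vI (j + 1) * 10 + 1 := by
        unfold vI; rw [v_child1]; push_cast; ring
      have h2 : vI (3 * (j + 1) + 2) = vI (j + 1) * 10 + 2 := by
        unfold vI; rw [v_child2]; push_cast; ring
      have h3 : vI (3 * (j + 1) + 3) = vI (j + 1) * 10 + 3 := by
        unfold vI; rw [v_child3]; push_cast; ring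
      have : List.range' (3 * j + 4) 3 = [3 * j + 4, 3 * j + 5, 3 * j + 6] := by
        simp [List.range'_succ]
      rw [this]
      simp only [List.map_cons, List.map_nil]
      rw [show 3 * j + 4 = 3 * (j + 1) + 1 from by ring,
          show 3 * j + 5 = 3 * (j + 1) + 2 from by ring,
          show 3 * j + 6 = 3 * (j + 1) + 3 from by ring, h1, h2, h3]
    have hqueue : (List.range' (j + 2) (2 * j + 2)).map vI
          ++ [vI (j+1) * 10 + 1, vI (j+1) * 10 + 2, vI (j+1) * 10 + 3]
        = (List.range' (j + 1 + 1) (2 * (j + 1) + 3)).map vI := by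
      rw [hchildren, ← List.map_append]
      congr 1
      have h := @List.range'_append (j + 2) (2 * j + 2) 3 1
      rw [show j + 2 + 1 * (2 * j + 2) = 3 * j + 4 from by ring] at h
      rw [h]
      congr 1
    rw [hqueue, ih (j + 1) (res ++ [vI (j + 1)])]
    rw [List.append_assoc]
    congr 1

lemma solve_alt_eq (A : Int) : solve_alt A = (List.range' 1 A.toNat).map vI := by
  unfold solve_alt
  rw [PySem.List.pyRange_one]
  have hlen : (A + 1 - 1).toNat = A.toNat := by omega
  rw [hlen, List.range'_eq_map_range]
  rw [List.map_map, List.map_map]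
  apply List.map_congr_left
  intro k _
  show convAux ((1 : Int) + (k : Int)) 0 1 = vI (1 + k)
  have h : (1 : Int) + (k : Int) = ((1 + k : Nat) : Int) := by push_cast; ring
  rw [h, convAux_eq]
  unfold vI
  ring

-- ===== VERDICT (by name: the statement is the Claim_ definition above) =====
theorem solve_spec : Claim_equal_solve := by
  intro A _
  show solve A = solve_alt A
  rw [solve_alt_eq]
  unfold solve
  have hinit : ([1, 2, 3] : List Int) = (List.range' 1 3).map vI := by
    have : List.range' 1 3 = [1, 2, 3] := by simp [List.range'_succ]
    rw [this]
    simp only [List.map_cons, List.map_nil]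
    norm_num [vI, v]
  rw [hinit]
  have := solveLoop_eq A.toNat 0 []
  simpa using this
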